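-- pv_equiv track=rewrite | github.com/ruvamd/Python-CodePractice | g free the bunny prisoners.py | solution
-- ===== SOURCE A (Python) =====
-- from itertools import combinations
--
-- def solution(num_buns, num_required):
--     buns=[[] for i in range(num_buns)]
--     if num_required==0:
--         return buns
--     startLock=0
--     for copie in combinations(buns,num_buns - num_required + 1):
--         for item in copie:
--             item.append(startLock)
--         startLock+=1
--     return buns
-- ===== SOURCE B (Python) =====
-- from itertools import combinations
--
-- def solution(num_buns, num_required):
--     if num_required == 0:
--         return [[] for _ in range(num_buns)]
--     masks = [sum(1 << bunny for bunny in combo)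
--              for combo in combinations(range(num_buns), num_buns - num_required + 1)]
--     rows = []
--     for bunny in range(num_buns):
--         bit = 1 << bunny
--         rows.append([lock for lock, mask in enumerate(masks) if mask & bit])
--     return rows
-- ===== Notes on version B (the rewrite author's own statement) =====
-- stated objective: alternative
-- what changed: B builds one bitmask per combination and then gathers each bunny's lock list with a per-bunny pass that keeps the lock numbers whose mask has that bunny's bit set, instead of A's single scatter pass that mutates per-bunny list objects while iterating combinations of those objects; Pre_ excludes only the inputs where A raises ValueError (num_required != 0 with negative combination size num_buns - num_required + 1).
import Mathlib
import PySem

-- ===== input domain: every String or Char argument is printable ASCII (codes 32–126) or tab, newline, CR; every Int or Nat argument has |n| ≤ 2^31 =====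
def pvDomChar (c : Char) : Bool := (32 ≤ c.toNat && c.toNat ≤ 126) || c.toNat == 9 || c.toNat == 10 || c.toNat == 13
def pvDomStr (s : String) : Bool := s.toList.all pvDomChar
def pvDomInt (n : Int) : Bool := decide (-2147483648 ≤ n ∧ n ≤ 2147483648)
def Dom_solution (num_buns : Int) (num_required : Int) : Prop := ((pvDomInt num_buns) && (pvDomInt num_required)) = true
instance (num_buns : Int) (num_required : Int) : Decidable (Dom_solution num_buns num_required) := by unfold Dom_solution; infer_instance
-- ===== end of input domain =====

-- B gathers each bunny's locks from a bitmask per combination instead of A's scatter pass that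
-- mutates the per-bunny lists; return value only (A mutates only lists it created itself).

-- ===== PORT A =====
-- itertools.combinations(xs, k) in itertools' order (itertools yields nothing when r > len(pool): guard)
def pvComb {α : Type} : List α → Nat → List (List α)
  | _, 0 => [[]]
  | [], _ + 1 => []
  | x :: xs, k + 1 =>
    if xs.length < k then []
    else (pvComb xs k).map (x :: ·) ++ pvComb xs (k + 1)

-- item.append(startLock) on the bunny list at position j (combinations of the bun list objects are modelled by combinations of their positions)
def pvAppendAt (bs : List (List Int)) (j : Nat) (v : Int) : List (List Int) :=
  bs.set j (bs.getD j [] ++ [v])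

-- A's for-loop over combinations with the startLock counter
def pvScatterA (bs : List (List Int)) (cs : List (List Nat)) (s : Int) : List (List Int) :=
  match cs with
  | [] => bs
  | c :: rest => pvScatterA (c.foldl (fun b j => pvAppendAt b j s) bs) rest (s + 1)

def solution (num_buns : Int) (num_required : Int) : List (List Int) :=
  let buns := (List.range num_buns.toNat).map (fun _ => ([] : List Int))
  if num_required == 0 then buns
  else pvScatterA buns (pvComb (List.range num_buns.toNat) (num_buns - num_required + 1).toNat) 0

-- ===== PORT B =====
def solution_alt (num_buns : Int) (num_required : Int) : List (List Int) :=
  if num_required == 0 then (List.range num_buns.toNat).map (fun _ => ([] : List Int))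
  else
    let masks := (pvComb (List.range num_buns.toNat) (num_buns - num_required + 1).toNat).map
      (fun combo => (combo.map (fun bunny => 1 <<< bunny)).sum)
    (List.range num_buns.toNat).map (fun bunny =>
      let bit := 1 <<< bunny
      ((PySem.List.enumerate masks 0).filter (fun p => decide (p.2 &&& bit ≠ 0))).map
        (fun p => p.1))

-- ===== PRECONDITION & SPEC =====
-- Pre_ excludes exactly the inputs where Python A raises ValueError: num_required ≠ 0 together with
-- a negative combination size num_buns - num_required + 1 (combinations' r must be non-negative).
def Pre_solution (num_buns : Int) (num_required : Int) : Prop :=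
  num_required = 0 ∨ 0 ≤ num_buns - num_required + 1
instance (num_buns : Int) (num_required : Int) : Decidable (Pre_solution num_buns num_required) := by unfold Pre_solution; infer_instance
def pvWitness_solution : Int × Int := (3, 2)

def Spec_solution (num_buns : Int) (num_required : Int) (out : List (List Int)) : Prop := out = solution_alt num_buns num_required
instance (num_buns : Int) (num_required : Int) (out : List (List Int)) : Decidable (Spec_solution num_buns num_required out) := by unfold Spec_solution; infer_instance

-- ===== CLAIM (what is proved, stated in full; the proofs are below) =====
def Claim_equal_solution : Prop := ∀ (num_buns : Int) (num_required : Int), Dom_solution num_buns num_required → Pre_solution num_buns num_required → Spec_solution num_buns num_required (solution num_buns num_required)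

-- ===== LEMMAS AND PROOFS =====

-- the bitmask B builds for one combination
def pvMask (c : List Nat) : Nat := (c.map (fun bunny => 1 <<< bunny)).sum

-- the lock list of bunny i over the block of combinations cs numbered from s
def pvGather (i : Nat) (cs : List (List Nat)) (s : Int) : List Int :=
  ((PySem.List.enumerate cs s).filter (fun p => decide (i ∈ p.2))).map (fun p => p.1)

theorem pvGather_nil (i : Nat) (s : Int) : pvGather i [] s = [] := rfl

theorem pvGather_cons (i : Nat) (c : List Nat) (cs : List (List Nat)) (s : Int) :
    pvGather i (c :: cs) s = (if i ∈ c then [s] else []) ++ pvGather i cs (s + 1) := by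
  simp [pvGather, PySem.List.enumerate_cons]
  split_ifs with h <;> simp [h]

-- adding 2^b to a number whose bit b is clear sets exactly bit b (no carries)
theorem pvTestBit_two_pow_add (b x : Nat) (hx : x.testBit b = false) (i : Nat) :
    (2 ^ b + x).testBit i = ((i == b) || x.testBit i) := by
  rcases Nat.lt_trichotomy i b with h | rfl | h
  · rw [Nat.testBit_two_pow_add_gt h]
    simp [Nat.ne_of_lt h]
  · rw [Nat.testBit_two_pow_add_eq, hx]
    simp
  · obtain ⟨j, rfl⟩ : ∃ j, i = j + (b + 1) := ⟨i - (b + 1), by omega⟩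
    rw [Nat.testBit_add, Nat.testBit_add]
    have hdiv : (2 ^ b + x) / 2 ^ (b + 1) = x / 2 ^ (b + 1) := by
      have hx2 : x % 2 ^ (b + 1) < 2 ^ b := by
        have hb : (x % 2 ^ (b + 1)).testBit b = false := by
          rw [Nat.testBit_mod_two_pow]
          simp [hx]
        by_contra hge'
        have hge : 2 ^ b ≤ x % 2 ^ (b + 1) := Nat.le_of_not_lt hge'
        have hlt : x % 2 ^ (b + 1) < 2 ^ (b + 1) :=
          Nat.mod_lt _ (Nat.two_pow_pos _)
        have hq : x % 2 ^ (b + 1) / 2 ^ b = 1 := by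
          have h2 : 2 ^ (b + 1) = 2 * 2 ^ b := by rw [pow_succ]; ring
          rw [Nat.div_eq_sub_div (Nat.two_pow_pos _) hge]
          rw [Nat.div_eq_of_lt (by omega)]
        rw [Nat.testBit_eq_decide_div_mod_eq, hq] at hb
        simp at hb
      conv_lhs => rw [← Nat.div_add_mod x (2 ^ (b + 1))]
      conv_rhs => rw [← Nat.div_add_mod x (2 ^ (b + 1))]
      have hpos : 0 < 2 ^ (b + 1) := Nat.two_pow_pos _
      have h2 : 2 ^ b + (2 ^ (b + 1) * (x / 2 ^ (b + 1)) + x % 2 ^ (b + 1)) =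
          2 ^ (b + 1) * (x / 2 ^ (b + 1)) + (2 ^ b + x % 2 ^ (b + 1)) := by ring
      rw [h2, Nat.mul_add_div hpos, Nat.mul_add_div hpos]
      have h3 : (2 ^ b + x % 2 ^ (b + 1)) / 2 ^ (b + 1) = 0 := by
        apply Nat.div_eq_of_lt
        have : 2 ^ (b + 1) = 2 ^ b + 2 ^ b := by rw [pow_succ]; ring
        omega
      have h4 : x % 2 ^ (b + 1) / 2 ^ (b + 1) = 0 := Nat.div_eq_of_lt (Nat.mod_lt _ hpos)
      rw [h3, h4]
    rw [hdiv]
    simp [show j + (b + 1) ≠ b from by omega]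

theorem pvMask_testBit (c : List Nat) (hnd : c.Nodup) : ∀ (i : Nat),
    (pvMask c).testBit i = decide (i ∈ c) := by
  induction c with
  | nil => intro i; simp [pvMask]
  | cons b rest ih =>
    simp only [List.nodup_cons] at hnd
    intro i
    have hrest : (pvMask rest).testBit b = false := by
      rw [ih hnd.2 b]
      simp [hnd.1]
    have hm : pvMask (b :: rest) = 2 ^ b + pvMask rest := by
      simp [pvMask, Nat.one_shiftLeft]
    rw [hm, pvTestBit_two_pow_add b (pvMask rest) hrest, ih hnd.2 i]
    by_cases h : i = b <;> simp [h]

theorem pvMask_and (c : List Nat) (hnd : c.Nodup) (i : Nat) :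
    (pvMask c &&& (1 <<< i) ≠ 0) ↔ i ∈ c := by
  rw [Nat.one_shiftLeft, Nat.and_two_pow, pvMask_testBit c hnd i]
  by_cases h : i ∈ c
  · simp only [h, decide_true, Bool.toNat_true, one_mul, iff_true]
    positivity
  · simp [h]

-- B's row for bunny i equals the gather over the combinations themselves
theorem pvRowB (cs : List (List Nat)) (s : Int) (i : Nat) (hnd : ∀ c ∈ cs, c.Nodup) :
    ((PySem.List.enumerate (cs.map pvMask) s).filter
        (fun p => decide (p.2 &&& (1 <<< i) ≠ 0))).map (fun p => p.1) = pvGather i cs s := by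
  induction cs generalizing s with
  | nil => rfl
  | cons c cs ih =>
    have hc : (pvMask c &&& (1 <<< i) ≠ 0) ↔ i ∈ c := pvMask_and c (hnd c (by simp)) i
    rw [List.map_cons, PySem.List.enumerate_cons, pvGather_cons,
      ← ih (s + 1) (fun c' hc' => hnd c' (by simp [hc']))]
    simp only [List.filter_cons]
    by_cases h : i ∈ c
    · rw [if_pos (show (decide ((pvMask c) &&& (1 <<< i) ≠ 0)) = true from by
        simp only [decide_eq_true_eq]; exact hc.mpr h)]
      simp [h]
    · rw [if_neg (show ¬ (decide ((pvMask c) &&& (1 <<< i) ≠ 0)) = true from by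
        simp only [decide_eq_true_eq]; exact fun hp => h (hc.mp hp))]
      simp [h]

theorem pvAppendAt_length (bs : List (List Int)) (j : Nat) (v : Int) :
    (pvAppendAt bs j v).length = bs.length := by
  simp [pvAppendAt]

theorem pvScatterOne_length (c : List Nat) (bs : List (List Int)) (s : Int) :
    (c.foldl (fun b j => pvAppendAt b j s) bs).length = bs.length := by
  induction c generalizing bs with
  | nil => rfl
  | cons j c ih => simp [List.foldl, ih, pvAppendAt_length]

theorem pvScatterA_length (cs : List (List Nat)) (bs : List (List Int)) (s : Int) :
    (pvScatterA bs cs s).length = bs.length := by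
  induction cs generalizing bs s with
  | nil => rfl
  | cons c cs ih => simp [pvScatterA, ih, pvScatterOne_length]

theorem pvComb_sublist {α : Type} (xs : List α) (k : Nat) (c : List α)
    (hc : c ∈ pvComb xs k) : c.Sublist xs := by
  induction xs generalizing k c with
  | nil =>
    cases k with
    | zero => simp [pvComb] at hc; simp [hc]
    | succ k => simp [pvComb] at hc
  | cons x xs ih =>
    cases k with
    | zero => simp [pvComb] at hc; simp [hc]
    | succ k =>
      by_cases hg : xs.length < k
      · simp [pvComb, hg] at hc
      · simp [pvComb, hg] at hc
        rcases hc with ⟨c', hc', rfl⟩ | hc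
        · exact (ih k c' hc').cons₂ x
        · exact (ih (k + 1) c hc).cons x

theorem pvScatterOne_getD (c : List Nat) (bs : List (List Int)) (s : Int) (i : Nat)
    (hi : i < bs.length) (hnd : c.Nodup) :
    (c.foldl (fun b j => pvAppendAt b j s) bs).getD i [] =
      bs.getD i [] ++ (if i ∈ c then [s] else []) := by
  induction c generalizing bs with
  | nil => simp
  | cons j c ih =>
    simp only [List.nodup_cons] at hnd
    have hlen : (pvAppendAt bs j s).length = bs.length := pvAppendAt_length bs j s
    have := ih (pvAppendAt bs j s) (by rw [hlen]; exact hi) hnd.2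
    simp only [List.foldl] at this ⊢
    rw [this]
    by_cases hij : i = j
    · subst hij
      have hmem : i ∉ c := hnd.1
      simp [pvAppendAt, hmem, hi]
    · have heq : (pvAppendAt bs j s).getD i [] = bs.getD i [] := by
        simp [pvAppendAt, List.getElem?_set_ne (fun h' => hij h'.symm)]
      rw [heq]
      simp [hij]

theorem pvScatterA_getD (cs : List (List Nat)) (bs : List (List Int)) (s : Int) (i : Nat)
    (hi : i < bs.length) (hnd : ∀ c ∈ cs, c.Nodup) :
    (pvScatterA bs cs s).getD i [] = bs.getD i [] ++ pvGather i cs s := by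
  induction cs generalizing bs s with
  | nil => simp [pvScatterA, pvGather_nil]
  | cons c cs ih =>
    simp only [pvScatterA]
    rw [ih _ _ (by rw [pvScatterOne_length]; exact hi) (fun c hc => hnd c (by simp [hc]))]
    rw [pvScatterOne_getD c bs s i hi (hnd c (by simp)), pvGather_cons, List.append_assoc]

-- ===== VERDICT (by name: the statement is the Claim_ definition above) =====
theorem solution_spec : Claim_equal_solution := by
  unfold Claim_equal_solution
  intro n r _ _
  unfold Spec_solution solution solution_alt
  by_cases h0 : (r == 0) = true
  · simp only [h0, if_true]
  · simp only [h0, Bool.false_eq_true, if_false]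
    have hnd : ∀ c ∈ pvComb (List.range n.toNat) (n - r + 1).toNat, c.Nodup :=
      fun c hc => (pvComb_sublist _ _ c hc).nodup List.nodup_range
    apply List.ext_getElem
    · simp [pvScatterA_length]
    · intro j h1 h2
      have hj : j < n.toNat := by
        simpa [pvScatterA_length] using h1
      rw [← List.getD_eq_getElem _ [] h1]
      rw [pvScatterA_getD _ _ 0 j (by simpa using hj) hnd]
      have hmap : (pvComb (List.range n.toNat) (n - r + 1).toNat).map
            (fun combo => (combo.map (fun bunny => 1 <<< bunny)).sum) =
          (pvComb (List.range n.toNat) (n - r + 1).toNat).map pvMask := rfl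
      simp only [hmap, List.getElem_map, List.getElem_range]
      rw [pvRowB _ 0 j hnd]
      simp [hj]
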